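-- pv_equiv track=rewrite | github.com/cyal1/forbidden | src/forbidden.py | get_directories
-- ===== SOURCE A (Python) =====
-- def get_directories(path = None):
-- 	const = "/"
-- 	directory = const
-- 	tmp = [directory]
-- 	if path:
-- 		paths = path.split(const)
-- 		for path in paths:
-- 			if path:
-- 				directory += path + const
-- 				tmp.append(directory)
-- 	return unique(tmp)
--
-- def unique(sequence):
-- 	seen = set()
-- 	return [x for x in sequence if not (x in seen or seen.add(x))]
-- ===== SOURCE B (Python) =====
-- def get_directories(path=None):
--     parts = [p for p in path.split("/") if p] if path else []
--     return ["/" + "".join(q + "/" for q in parts[:i]) for i in range(len(parts) + 1)]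
-- ===== Notes on version B (the rewrite author's own statement) =====
-- stated objective: simpler
-- what changed: B drops the running accumulator and the seen-set dedup entirely: it reconstructs each prefix independently from a slice of the non-empty path parts ('/' plus the joined first i parts), which are provably all distinct so no unique() pass is needed.
import Mathlib
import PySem

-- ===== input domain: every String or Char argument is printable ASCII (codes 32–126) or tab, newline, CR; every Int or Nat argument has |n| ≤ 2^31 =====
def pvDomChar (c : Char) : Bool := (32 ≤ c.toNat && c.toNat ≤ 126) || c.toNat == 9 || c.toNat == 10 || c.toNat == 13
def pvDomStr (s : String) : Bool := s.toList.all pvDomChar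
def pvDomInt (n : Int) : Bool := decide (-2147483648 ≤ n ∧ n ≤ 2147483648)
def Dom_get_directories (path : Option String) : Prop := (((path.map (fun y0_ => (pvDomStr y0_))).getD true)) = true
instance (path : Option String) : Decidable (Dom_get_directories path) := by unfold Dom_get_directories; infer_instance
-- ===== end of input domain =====

-- B rebuilds each ancestor-directory prefix independently from a slice of the path parts and,
-- since these prefixes are provably pairwise distinct, drops A's seen-set dedup pass (objective: simpler).


-- ===== PORT A =====
-- helper 'unique' of the module: seen = set(); [x for x in sequence if not (x in seen or seen.add(x))]
def unique (sequence : List String) : List String :=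
  (sequence.foldl
    (fun (st : List String × PySem.Set String) x =>
      if PySem.Set.contains st.2 x then st
      else (st.1 ++ [x], PySem.Set.add st.2 x))
    ([], PySem.Set.empty)).1

def get_directories (path : Option String) : List String :=
  let const := "/"
  let directory := const
  let tmp := [directory]
  match path with
  | none => unique tmp          -- 'if path:' false for None
  | some s =>
    if s = "" then unique tmp   -- 'if path:' false for ""
    else
      -- paths = path.split(const); for path in paths: if path: directory += path + const; tmp.append(directory)
      let paths := (PySem.Str.split? s const).getD []
      let st := paths.foldl
        (fun (st : String × List String) p =>
          if p = "" then st
          else (st.1 ++ (p ++ const), st.2 ++ [st.1 ++ (p ++ const)]))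
        (directory, tmp)
      unique st.2

-- ===== PORT B =====
def get_directories_alt (path : Option String) : List String :=
  -- parts = [p for p in path.split("/") if p] if path else []
  let parts : List String :=
    match path with
    | none => []
    | some s =>
      if s = "" then []
      else ((PySem.Str.split? s "/").getD []).filter (fun p => p ≠ "")
  -- ["/" + "".join(q + "/" for q in parts[:i]) for i in range(len(parts) + 1)]
  (List.range (parts.length + 1)).map
    (fun i => "/" ++ PySem.Str.join "" ((parts.take i).map (fun q => q ++ "/")))

-- ===== PRECONDITION & SPEC =====
def Spec_get_directories (path : Option String) (out : List String) : Prop := out = get_directories_alt path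
instance (path : Option String) (out : List String) : Decidable (Spec_get_directories path out) := by unfold Spec_get_directories; infer_instance

-- ===== CLAIM (what is proved, stated in full; the proofs are below) =====
def Claim_equal_get_directories : Prop := ∀ (path : Option String), Dom_get_directories path → Spec_get_directories path (get_directories path)

-- ===== LEMMAS AND PROOFS =====

-- the cumulative prefixes A's loop appends, starting from directory d
def pvPrefs (d : String) : List String → List String
  | [] => []
  | p :: ps => (d ++ (p ++ "/")) :: pvPrefs (d ++ (p ++ "/")) ps

-- the final value of 'directory' after the loop
def pvEnd (d : String) : List String → String
  | [] => d
  | p :: ps => pvEnd (d ++ (p ++ "/")) ps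

-- A's loop over paths = pvEnd / pvPrefs over the filtered parts
theorem pvLoop_eq (ps : List String) : ∀ (d : String) (t : List String),
    ps.foldl
      (fun (st : String × List String) p =>
        if p = "" then st
        else (st.1 ++ (p ++ "/"), st.2 ++ [st.1 ++ (p ++ "/")]))
      (d, t)
    = (pvEnd d (ps.filter (fun p => p ≠ "")),
       t ++ pvPrefs d (ps.filter (fun p => p ≠ ""))) := by
  induction ps with
  | nil => intro d t; simp [pvEnd, pvPrefs]
  | cons p ps ih =>
    intro d t
    by_cases hp : p = ""
    · simp [hp, List.foldl_cons, ih]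
    · simp [hp, List.foldl_cons, ih, pvEnd, pvPrefs]

-- each prefix joined (Str.join "") splits off its head
theorem pvJoin_cons (x : String) (xs : List String) :
    PySem.Str.join "" (x :: xs) = x ++ PySem.Str.join "" xs := by
  apply String.toList_inj.mp
  cases xs with
  | nil => simp [PySem.Str.toList_join, PySem.Chars.join, List.intercalate]
  | cons y ys =>
    simp [PySem.Str.toList_join, PySem.Chars.join, List.intercalate]

theorem pvJoin_nil : PySem.Str.join "" ([] : List String) = "" := rfl

-- B's comprehension = d :: pvPrefs d parts
theorem pvB_eq (ps : List String) : ∀ (d : String),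
    (List.range (ps.length + 1)).map
      (fun i => d ++ PySem.Str.join "" ((ps.take i).map (fun q => q ++ "/")))
    = d :: pvPrefs d ps := by
  induction ps with
  | nil => intro d; simp [pvPrefs, pvJoin_nil]
  | cons p ps ih =>
    intro d
    simp only [List.length_cons]
    rw [List.range_succ_eq_map]
    simp only [List.map_cons, List.map_map]
    refine congrArg₂ (· :: ·) (by simp [pvJoin_nil]) ?_
    rw [pvPrefs]
    rw [← ih (d ++ (p ++ "/"))]
    refine List.map_congr_left ?_
    intro i _
    simp [pvJoin_cons, String.append_assoc]

-- every element of pvPrefs d ps is strictly longer than d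
theorem pvPrefs_len_lt (ps : List String) : ∀ (d x : String),
    x ∈ pvPrefs d ps → d.toList.length < x.toList.length := by
  induction ps with
  | nil => intro d x hx; simp [pvPrefs] at hx
  | cons p ps ih =>
    intro d x hx
    have hlen : d.toList.length < (d ++ (p ++ "/")).toList.length := by
      simp
    rcases (by simpa [pvPrefs] using hx) with h | h
    · simpa [h] using hlen
    · exact lt_trans hlen (ih _ _ h)

theorem pvPrefs_nodup (ps : List String) : ∀ (d : String),
    (d :: pvPrefs d ps).Nodup := by
  induction ps with
  | nil => intro d; simp [pvPrefs]
  | cons p ps ih =>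
    intro d
    refine List.nodup_cons.mpr ⟨?_, by simpa [pvPrefs] using ih (d ++ (p ++ "/"))⟩
    intro hmem
    exact absurd rfl (Nat.ne_of_lt (pvPrefs_len_lt (p :: ps) d d hmem)).symm

-- A's 'unique' is the identity on a list without duplicates
theorem pvUnique_aux (l : List String) : ∀ (acc : List String) (seen : PySem.Set String),
    l.Nodup → (∀ x ∈ l, PySem.Set.contains seen x = false) →
    (l.foldl
      (fun (st : List String × PySem.Set String) x =>
        if PySem.Set.contains st.2 x then st
        else (st.1 ++ [x], PySem.Set.add st.2 x)) (acc, seen)).1 = acc ++ l := by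
  induction l with
  | nil => intro acc seen _ _; simp
  | cons x l ih =>
    intro acc seen hnd hseen
    have hx : PySem.Set.contains seen x = false := hseen x (by simp)
    have hnd' := List.nodup_cons.mp hnd
    simp only [List.foldl_cons, hx, Bool.false_eq_true, if_false]
    rw [ih (acc ++ [x]) (PySem.Set.add seen x) hnd'.2 ?_]
    · simp
    · intro y hy
      have hy_ne : y ≠ x := fun h => hnd'.1 (h ▸ hy)
      have : ¬ y ∈ PySem.Set.add seen x := by
        simp [PySem.Set.mem_add, hy_ne]
        intro hmem
        have := hseen y (by simp [hy])
        simp at this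
        exact this hmem
      simpa [PySem.Set.contains_iff] using this

theorem pvUnique_nodup (l : List String) (h : l.Nodup) : unique l = l := by
  unfold unique
  simpa using pvUnique_aux l [] PySem.Set.empty h (by intro x _; rfl)

theorem pvMain (parts : List String) :
    unique ("/" :: pvPrefs "/" parts) =
    (List.range (parts.length + 1)).map
      (fun i => "/" ++ PySem.Str.join "" ((parts.take i).map (fun q => q ++ "/"))) := by
  rw [pvB_eq, pvUnique_nodup _ (pvPrefs_nodup parts "/")]

-- ===== VERDICT (by name: the statement is the Claim_ definition above) =====
theorem get_directories_spec : Claim_equal_get_directories := by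
  intro path _
  unfold Spec_get_directories get_directories get_directories_alt
  match path with
  | none =>
      simpa [pvPrefs] using pvMain []
  | some s =>
      by_cases hs : s = ""
      · simp only [hs, if_true]
        simpa [pvPrefs] using pvMain []
      · simp only [hs, if_false]
        rw [pvLoop_eq]
        simpa [pvPrefs] using pvMain (((PySem.Str.split? s "/").getD []).filter (fun p => p ≠ ""))
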